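-- pv_equiv track=rewrite | github.com/seongddiyong/practice_coding | python/python_study/midas_3.py | solution
-- ===== SOURCE A (Python) =====
-- def solution(n, v, A, B, C):
--     answer = -1
--     AB = sorted([a * b for a in A for b in B if a * b <= v])
--     C = sorted([c for c in C if c <= v])
--     for ab in AB:
--         for c in C:
--             if ab * c <= v:
--                 answer = max(answer, ab * c)
--             else:
--                 break
--     return answer
-- ===== SOURCE B (Python) =====
-- def solution(n, v, A, B, C):
--     # Sort C once; for each product ab, the best admissible c is found by a
--     # binary search (ab > 0) or a direct head/zero case (ab <= 0), instead of
--     # scanning C for every ab.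
--     Cs = sorted(c for c in C if c <= v)
--     best = -1
--     for a in A:
--         for b in B:
--             ab = a * b
--             if ab > v:
--                 continue
--             if ab > 0:
--                 t = v // ab  # ab*c <= v  <=>  c <= t
--                 lo, hi = 0, len(Cs)
--                 while lo < hi:
--                     mid = (lo + hi) // 2
--                     if Cs[mid] <= t:
--                         lo = mid + 1
--                     else:
--                         hi = mid
--                 if lo > 0:
--                     best = max(best, ab * Cs[lo - 1])
--             elif ab == 0:
--                 if Cs and 0 <= v:
--                     best = max(best, 0)
--             else:
--                 if Cs and ab * Cs[0] <= v:
--                     best = max(best, ab * Cs[0])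
--     return best
-- ===== Notes on version B (the rewrite author's own statement) =====
-- stated objective: faster
-- what changed: Instead of sorting all |A||B| pair products and linearly scanning sorted C for each of them, B sorts C once and for each product a*b finds the best admissible c directly: by binary search for the largest c <= v//(a*b) when a*b>0, and by a constant-time head/zero case when a*b<=0.
import Mathlib
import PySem

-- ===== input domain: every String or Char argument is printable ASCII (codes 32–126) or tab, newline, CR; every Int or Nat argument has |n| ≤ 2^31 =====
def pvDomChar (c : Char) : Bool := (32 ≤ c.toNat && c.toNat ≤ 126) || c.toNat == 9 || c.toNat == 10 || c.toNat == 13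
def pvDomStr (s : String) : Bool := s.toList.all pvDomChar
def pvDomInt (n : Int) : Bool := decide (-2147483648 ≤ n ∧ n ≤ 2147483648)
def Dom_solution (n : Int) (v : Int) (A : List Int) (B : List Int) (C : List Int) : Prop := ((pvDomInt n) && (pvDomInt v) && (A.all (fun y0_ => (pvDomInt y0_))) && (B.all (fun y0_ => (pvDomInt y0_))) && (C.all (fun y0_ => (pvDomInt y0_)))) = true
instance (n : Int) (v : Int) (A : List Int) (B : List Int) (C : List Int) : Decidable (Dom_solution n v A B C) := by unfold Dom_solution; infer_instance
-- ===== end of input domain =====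

-- B replaces A's linear scan of sorted C for every pair product by one sort of C and,
-- per product, a binary search (product > 0) or a constant-time head case (product ≤ 0);
-- objective: faster.

-- ===== PORT A =====
-- inner 'for c in C: if ab*c <= v: answer = max(answer, ab*c) else: break'
def loopC (v ab : Int) (ans : Int) : List Int → Int
  | [] => ans
  | c :: rest => if ab * c ≤ v then loopC v ab (max ans (ab * c)) rest else ans

def solution (n : Int) (v : Int) (A : List Int) (B : List Int) (C : List Int) : Int :=
  let AB := PySem.List.sorted (A.flatMap (fun a => (B.map (fun b => a * b)).filter (fun x => decide (x ≤ v)))) (fun x => x) false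
  let Cs := PySem.List.sorted (C.filter (fun c => decide (c ≤ v))) (fun x => x) false
  AB.foldl (fun ans ab => loopC v ab ans Cs) (-1)

-- ===== PORT B =====
-- hand-written 'while lo < hi' binary search of Source B, index pair (lo, hi)
def bsearch (Cs : List Int) (t : Int) (lo hi : Nat) : Nat :=
  if lo < hi then
    let mid := (lo + hi) / 2
    if Cs.getD mid 0 ≤ t then bsearch Cs t (mid + 1) hi else bsearch Cs t lo mid
  else lo
termination_by hi - lo
decreasing_by all_goals omega

-- body of Source B's double loop (the 'continue' guard, then the three sign cases)
def bstep (v : Int) (Cs : List Int) (best ab : Int) : Int :=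
  if ab > v then best
  else if ab > 0 then
    let t := PySem.Int.floordiv v ab
    let lo := bsearch Cs t 0 Cs.length
    if lo > 0 then max best (ab * Cs.getD (lo - 1) 0) else best
  else if ab = 0 then
    if Cs ≠ [] ∧ 0 ≤ v then max best 0 else best
  else
    match Cs with
    | [] => best
    | c0 :: _ => if ab * c0 ≤ v then max best (ab * c0) else best

def solution_alt (n : Int) (v : Int) (A : List Int) (B : List Int) (C : List Int) : Int :=
  let Cs := PySem.List.sorted (C.filter (fun c => decide (c ≤ v))) (fun x => x) false
  A.foldl (fun best a => B.foldl (fun best b => bstep v Cs best (a * b)) best) (-1)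

-- ===== PRECONDITION & SPEC =====
def Spec_solution (n : Int) (v : Int) (A : List Int) (B : List Int) (C : List Int) (out : Int) : Prop := out = solution_alt n v A B C
instance (n : Int) (v : Int) (A : List Int) (B : List Int) (C : List Int) (out : Int) : Decidable (Spec_solution n v A B C out) := by unfold Spec_solution; infer_instance

-- ===== CLAIM (what is proved, stated in full; the proofs are below) =====
def Claim_equal_solution : Prop := ∀ (n : Int) (v : Int) (A : List Int) (B : List Int) (C : List Int), Dom_solution n v A B C → Spec_solution n v A B C (solution n v A B C)

-- ===== LEMMAS AND PROOFS =====

-- A's inner break loop is a running max over the takeWhile prefix (any list, any ab)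
theorem loopC_eq_takeWhile (v ab : Int) (Cs : List Int) : ∀ ans,
    loopC v ab ans Cs = (Cs.takeWhile (fun c => decide (ab * c ≤ v))).foldl (fun a c => max a (ab * c)) ans := by
  induction Cs with
  | nil => intro ans; rfl
  | cons c rest ih =>
    intro ans
    by_cases h : ab * c ≤ v
    · simp [loopC, h, List.takeWhile_cons_of_pos, ih]
    · simp [loopC, h, List.takeWhile_cons_of_neg]

-- the pure per-product contribution, and how a running max consumes it
def contrib (v : Int) (Cs : List Int) (ab : Int) : Option Int :=
  ((Cs.takeWhile (fun c => decide (ab * c ≤ v))).map (fun c => ab * c)).max?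

def appC : Option Int → Int → Int
  | none, ans => ans
  | some m, ans => max ans m

theorem foldl_max_shift (l : List Int) : ∀ a ans, l.foldl max (max ans a) = max ans (l.foldl max a) := by
  induction l with
  | nil => intro a ans; rfl
  | cons c rest ih => intro a ans; simp only [List.foldl_cons, max_assoc]; exact ih _ _

theorem foldl_max_appC (l : List Int) (ans : Int) : l.foldl max ans = appC l.max? ans := by
  cases l with
  | nil => rfl
  | cons a rest => rw [List.max?_cons', appC, List.foldl_cons, ← foldl_max_shift, max_comm ans a]
    -- foldl max (max ans a) rest vs max ans (foldl max a rest)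

theorem loopC_appC (v ab : Int) (Cs : List Int) (ans : Int) :
    loopC v ab ans Cs = appC (contrib v Cs ab) ans := by
  rw [loopC_eq_takeWhile, contrib, ← foldl_max_appC, ← List.foldl_map]

theorem appC_comm (o1 o2 : Option Int) (ans : Int) : appC o1 (appC o2 ans) = appC o2 (appC o1 ans) := by
  cases o1 <;> cases o2 <;> simp [appC, max_left_comm, max_comm]

-- max? of a nonempty list whose maximum M is known
theorem max?_eq_some_of_ub (l : List Int) (M : Int) (hmem : M ∈ l) (hub : ∀ x ∈ l, x ≤ M) :
    l.max? = some M := by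
  cases l with
  | nil => cases hmem
  | cons a rest =>
    rw [List.max?_cons']
    have h1 := PySem.List.le_foldl_max rest a
    have h2 := PySem.List.foldl_max_mem rest a
    have hMle : M ≤ rest.foldl max a := by
      rcases List.mem_cons.mp hmem with h | h
      · exact h ▸ h1.1
      · exact h1.2 M h
    have hle : rest.foldl max a ≤ M := by
      rcases h2 with h | h
      · rw [h]; exact hub a List.mem_cons_self
      · exact hub _ (List.mem_cons_of_mem _ h)
    exact congrArg some (le_antisymm hle hMle)

-- getD monotonicity on a sorted list
theorem getD_mono (Cs : List Int) (hs : Cs.Pairwise (· ≤ ·)) (i j : Nat) (hij : i ≤ j) (hj : j < Cs.length) :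
    Cs.getD i 0 ≤ Cs.getD j 0 := by
  rw [List.getD_eq_getElem Cs 0 (lt_of_le_of_lt hij hj), List.getD_eq_getElem Cs 0 hj]
  rcases Nat.lt_or_ge i j with h | h
  · exact List.pairwise_iff_getElem.mp hs i j _ _ h
  · have : i = j := le_antisymm hij h
    subst this; exact le_refl _

-- binary-search invariant
theorem bsearch_inv (Cs : List Int) (t : Int) (hs : Cs.Pairwise (· ≤ ·)) :
    ∀ lo hi, lo ≤ hi → hi ≤ Cs.length →
    (∀ i, i < lo → Cs.getD i 0 ≤ t) → (∀ i, hi ≤ i → i < Cs.length → t < Cs.getD i 0) →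
    lo ≤ bsearch Cs t lo hi ∧ bsearch Cs t lo hi ≤ hi ∧
    (∀ i, i < bsearch Cs t lo hi → Cs.getD i 0 ≤ t) ∧
    (∀ i, bsearch Cs t lo hi ≤ i → i < Cs.length → t < Cs.getD i 0) := by
  have main : ∀ d lo hi, hi - lo = d → lo ≤ hi → hi ≤ Cs.length →
      (∀ i, i < lo → Cs.getD i 0 ≤ t) → (∀ i, hi ≤ i → i < Cs.length → t < Cs.getD i 0) →
      lo ≤ bsearch Cs t lo hi ∧ bsearch Cs t lo hi ≤ hi ∧
      (∀ i, i < bsearch Cs t lo hi → Cs.getD i 0 ≤ t) ∧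
      (∀ i, bsearch Cs t lo hi ≤ i → i < Cs.length → t < Cs.getD i 0) := by
    intro d
    induction d using Nat.strong_induction_on with
    | _ d ih =>
    intro lo hi hd hlohi hhi hpre hsuf
    rw [bsearch]
    by_cases hlt : lo < hi
    · simp only [hlt, if_true]
      by_cases hm : Cs.getD ((lo + hi) / 2) 0 ≤ t
      · simp only [hm, if_true]
        have hmid2 : (lo + hi) / 2 < hi := by omega
        have hrec := ih (hi - ((lo + hi) / 2 + 1)) (by omega) ((lo + hi) / 2 + 1) hi rfl (by omega) hhi
          (fun i hi' => le_trans (getD_mono Cs hs i ((lo + hi) / 2) (by omega) (by omega)) hm)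
          hsuf
        exact ⟨by omega, hrec.2.1, hrec.2.2.1, hrec.2.2.2⟩
      · simp only [hm, if_false]
        have hrec := ih ((lo + hi) / 2 - lo) (by omega) lo ((lo + hi) / 2) rfl (by omega) (by omega) hpre
          (fun i hi' hilen => lt_of_not_ge (fun hle =>
            hm (le_trans (getD_mono Cs hs ((lo + hi) / 2) i hi' hilen) hle)))
        exact ⟨hrec.1, by omega, hrec.2.2.1, hrec.2.2.2⟩
    · simp only [hlt, if_false]
      have : lo = hi := by omega
      exact ⟨le_refl _, le_of_eq this, hpre, fun i h1 h2 => hsuf i (this ▸ h1) h2⟩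
  intro lo hi
  exact main (hi - lo) lo hi rfl

-- a prefix certified pointwise is the takeWhile prefix
theorem takeWhile_eq_take (p : Int → Bool) : ∀ (l : List Int) (r : Nat), r ≤ l.length →
    (∀ i, i < r → p (l.getD i 0) = true) → (r < l.length → p (l.getD r 0) = false) →
    l.takeWhile p = l.take r := by
  intro l
  induction l with
  | nil => intro r hr _ _; simp at hr; simp [hr]
  | cons c rest ih =>
    intro r hr h1 h2
    cases r with
    | zero =>
      have hc : p c = false := by have := h2 (by simp); simpa using this
      rw [List.takeWhile_cons_of_neg (by simp [hc])]
      rfl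
    | succ r' =>
      have hc : p c = true := h1 0 (Nat.succ_pos r')
      rw [List.takeWhile_cons_of_pos hc, List.take_succ_cons]
      congr 1
      exact ih r' (by simpa using hr) (fun i hi => h1 (i + 1) (by omega))
        (fun hlt => h2 (by simpa using hlt))

-- members of `take r` sit below index r
theorem mem_take_getD (l : List Int) (r : Nat) (x : Int) (hx : x ∈ l.take r) :
    ∃ i, i < r ∧ i < l.length ∧ l.getD i 0 = x := by
  rcases List.getElem_of_mem hx with ⟨i, hi, heq⟩
  have hlen : i < l.length := by
    have := hi; simp [List.length_take] at this; omega
  refine ⟨i, ?_, hlen, ?_⟩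
  · have := hi; simp [List.length_take] at this; omega
  · rw [List.getD_eq_getElem l 0 hlen, ← List.getElem_take (h := hi), heq]

-- THE CORE: on a sorted list, A's break-scan step equals B's case-analysis step (for ab ≤ v)
theorem step_eq (v ab : Int) (Cs : List Int) (hs : Cs.Pairwise (· ≤ ·)) (hab : ab ≤ v) (ans : Int) :
    loopC v ab ans Cs = bstep v Cs ans ab := by
  rw [loopC_appC]
  rcases lt_trichotomy ab 0 with hneg | hz | hpos
  · -- ab < 0 : the head decides everything
    rw [bstep.eq_def, if_neg (by omega), if_neg (by omega), if_neg (by omega)]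
    cases Cs with
    | nil => rfl
    | cons c0 rest =>
      by_cases h0 : ab * c0 ≤ v
      · have hall : ∀ x ∈ c0 :: rest, ab * x ≤ v := by
          intro x hx
          rcases List.mem_cons.mp hx with h | h
          · exact h ▸ h0
          · have hc0x : c0 ≤ x := (List.pairwise_cons.mp hs).1 x h
            have : ab * x ≤ ab * c0 := by nlinarith
            exact le_trans this h0
        rw [contrib, List.takeWhile_eq_self_iff.mpr (fun x hx => by simpa using hall x hx)]
        rw [max?_eq_some_of_ub _ (ab * c0) (List.mem_map_of_mem List.mem_cons_self)
          (by intro x hx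
              rcases List.mem_map.mp hx with ⟨y, hy, rfl⟩
              have hc0y : c0 ≤ y := by
                rcases List.mem_cons.mp hy with h | h
                · exact h ▸ le_refl _
                · exact (List.pairwise_cons.mp hs).1 y h
              nlinarith)]
        simp [appC, h0]
      · rw [contrib, List.takeWhile_cons_of_neg (by simpa using h0)]
        simp [appC, h0]
  · -- ab = 0
    subst hz
    rw [bstep.eq_def, if_neg (by omega), if_neg (by omega), if_pos rfl]
    by_cases hv : (0 : Int) ≤ v
    · cases Cs with
      | nil => simp [contrib, appC]
      | cons c0 rest =>
        rw [contrib, List.takeWhile_eq_self_iff.mpr (fun x _ => by simpa using hv)]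
        rw [max?_eq_some_of_ub _ 0 (by
              refine List.mem_map.mpr ⟨c0, List.mem_cons_self, ?_⟩; ring)
            (by intro x hx
                rcases List.mem_map.mp hx with ⟨y, _, rfl⟩
                simp)]
        simp [appC, hv]
    · have : Cs.takeWhile (fun c => decide ((0:Int) * c ≤ v)) = [] := by
        cases Cs with
        | nil => rfl
        | cons c0 rest => exact List.takeWhile_cons_of_neg (by simpa using hv)
      rw [contrib, this]
      simp [appC, hv]
  · -- ab > 0 : binary search
    rw [bstep.eq_def, if_neg (by omega), if_pos hpos]
    simp only [gt_iff_lt]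
    set t := PySem.Int.floordiv v ab with ht
    have hiff : ∀ c : Int, (ab * c ≤ v) ↔ (c ≤ t) := by
      intro c
      rw [ht, PySem.Int.le_floordiv_iff_mul_le hpos, mul_comm]
    have hb := bsearch_inv Cs t hs 0 Cs.length (Nat.zero_le _) (le_refl _)
      (by omega) (by omega)
    set r := bsearch Cs t 0 Cs.length with hr
    have htake : Cs.takeWhile (fun c => decide (ab * c ≤ v)) = Cs.take r := by
      apply takeWhile_eq_take _ Cs r hb.2.1
      · intro i hi
        exact decide_eq_true ((hiff _).mpr (hb.2.2.1 i hi))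
      · intro hlt
        exact decide_eq_false (fun h => absurd ((hiff _).mp h) (not_le.mpr (hb.2.2.2 r (le_refl _) hlt)))
    rw [contrib, htake]
    by_cases hr0 : r > 0
    ·
      have hrlen : r ≤ Cs.length := hb.2.1
      have hr1len : r - 1 < Cs.length := by omega
      have hlast_mem : Cs.getD (r - 1) 0 ∈ Cs.take r := by
        rw [List.getD_eq_getElem Cs 0 hr1len]
        have : r - 1 < (Cs.take r).length := by simp [List.length_take]; omega
        rw [← List.getElem_take (h := this)]
        exact List.getElem_mem this
      rw [max?_eq_some_of_ub _ (ab * Cs.getD (r - 1) 0) (List.mem_map_of_mem hlast_mem)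
          (by intro x hx
              rcases List.mem_map.mp hx with ⟨y, hy, rfl⟩
              rcases mem_take_getD Cs r y hy with ⟨i, hir, hilen, rfl⟩
              have := getD_mono Cs hs i (r - 1) (by omega) hr1len
              nlinarith)]
      simp [appC, hr0]
    · have : r = 0 := by omega
      rw [this, List.take_zero]
      simp [appC]

-- ===== assembling the two folds =====
theorem outer_eq (v : Int) (Cs : List Int) (hs : Cs.Pairwise (· ≤ ·)) (L : List Int) :
    ∀ init, (L.filter (fun x => decide (x ≤ v))).foldl (fun ans ab => loopC v ab ans Cs) init
      = L.foldl (fun best x => bstep v Cs best x) init := by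
  induction L with
  | nil => intro init; rfl
  | cons x rest ih =>
    intro init
    by_cases hx : x ≤ v
    · rw [List.filter_cons_of_pos (by simpa using hx), List.foldl_cons, List.foldl_cons,
        ih, step_eq v x Cs hs hx]
    · rw [List.filter_cons_of_neg (by simpa using hx), List.foldl_cons, ih]
      have : bstep v Cs init x = init := by rw [bstep.eq_def, if_pos (by omega)]
      rw [this]

theorem solution_eq_alt (n v : Int) (A B C : List Int) : solution n v A B C = solution_alt n v A B C := by
  unfold solution solution_alt
  set Cs := PySem.List.sorted (C.filter (fun c => decide (c ≤ v))) (fun x => x) false with hCs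
  have hs : Cs.Pairwise (· ≤ ·) := PySem.List.sorted_pairwise _ _
  set AB0 := A.flatMap (fun a => (B.map (fun b => a * b)).filter (fun x => decide (x ≤ v))) with hAB0
  -- 1. sorting AB does not change a running max: fold is permutation invariant
  have hperm : (PySem.List.sorted AB0 (fun x => x) false).Perm AB0 := PySem.List.sorted_perm _ _ _
  haveI : RightCommutative (fun ans ab => loopC v ab ans Cs) :=
    ⟨fun a b1 b2 => by simp only [loopC_appC]; exact appC_comm _ _ _⟩
  rw [hperm.foldl_eq (-1)]
  -- 2. split the flatMap into the double loop, replace each scan by B's step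
  rw [List.foldl_flatMap]
  apply PySem.List.foldl_congr_mem
  intro acc a _
  rw [outer_eq v Cs hs, List.foldl_map]

-- ===== VERDICT (by name: the statement is the Claim_ definition above) =====
theorem solution_spec : Claim_equal_solution := by
  intro n v A B C _
  unfold Spec_solution
  exact solution_eq_alt n v A B C
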